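-- pv_equiv track=rewrite | github.com/santos-i/merotestes | script/equipments.py | defineSN
-- ===== SOURCE A (Python) =====
-- def defineSN(dict_serialNumbers):
--
--     anemometers = []
--     barometers = []
--     thermohygrometers = []
--
--     for key, value in dict_serialNumbers.items():
--         try:
--             value = int(value)
--             if 'ANE' in key: anemometers.append(value)
--             if 'BAR' in key: barometers.append(value)
--             if 'TH' in key: thermohygrometers.append(value)
--
--         except:pass
--
--     return anemometers, barometers, thermohygrometers
-- ===== SOURCE B (Python) =====
-- def defineSN(dict_serialNumbers):
--     valid = []
--     for key, value in dict_serialNumbers.items():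
--         try:
--             valid.append((key, int(value)))
--         except:
--             pass
--     return ([v for k, v in valid if 'ANE' in k],
--             [v for k, v in valid if 'BAR' in k],
--             [v for k, v in valid if 'TH' in k])
-- ===== Notes on version B (the rewrite author's own statement) =====
-- stated objective: simpler
-- what changed: Replaces the single loop that pushes into three accumulator lists with a precompute of the convertible (key,int) pairs followed by three filtered comprehensions, one per category.
import Mathlib
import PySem

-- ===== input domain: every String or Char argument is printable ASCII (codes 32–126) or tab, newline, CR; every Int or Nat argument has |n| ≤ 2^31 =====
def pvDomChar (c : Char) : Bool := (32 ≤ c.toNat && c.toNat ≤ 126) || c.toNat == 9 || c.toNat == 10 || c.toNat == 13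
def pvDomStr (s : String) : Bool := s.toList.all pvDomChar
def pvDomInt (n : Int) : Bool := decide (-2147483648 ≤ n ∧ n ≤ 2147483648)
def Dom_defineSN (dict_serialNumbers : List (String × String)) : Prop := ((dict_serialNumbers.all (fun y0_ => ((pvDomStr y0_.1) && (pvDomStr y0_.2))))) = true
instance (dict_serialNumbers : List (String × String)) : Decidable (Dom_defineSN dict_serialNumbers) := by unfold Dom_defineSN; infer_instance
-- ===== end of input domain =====

-- B builds the list of convertible (key,int) pairs once and then takes three filtered passes,
-- instead of A's single loop pushing into three accumulators (objective: simpler).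

-- ===== PORT A =====
def defineSN (dict_serialNumbers : List (String × String)) : List Int × List Int × List Int :=
  let state := dict_serialNumbers.foldl
    (fun (acc : List Int × List Int × List Int) kv =>
      match PySem.Int.ofStr? kv.2 with
      | none => acc                                    -- except: pass
      | some v =>
        let anemometers := if PySem.Str.isIn "ANE" kv.1 then acc.1 ++ [v] else acc.1
        let barometers := if PySem.Str.isIn "BAR" kv.1 then acc.2.1 ++ [v] else acc.2.1
        let thermohygrometers := if PySem.Str.isIn "TH" kv.1 then acc.2.2 ++ [v] else acc.2.2
        (anemometers, barometers, thermohygrometers))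
    ([], [], [])
  state

-- ===== PORT B =====
def pvValid (dict_serialNumbers : List (String × String)) : List (String × Int) :=
  dict_serialNumbers.filterMap (fun kv => (PySem.Int.ofStr? kv.2).map (fun v => (kv.1, v)))

def defineSN_alt (dict_serialNumbers : List (String × String)) : List Int × List Int × List Int :=
  let valid := pvValid dict_serialNumbers
  ((valid.filter (fun kv => PySem.Str.isIn "ANE" kv.1)).map (·.2),
   (valid.filter (fun kv => PySem.Str.isIn "BAR" kv.1)).map (·.2),
   (valid.filter (fun kv => PySem.Str.isIn "TH" kv.1)).map (·.2))

-- ===== PRECONDITION & SPEC =====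
def Spec_defineSN (dict_serialNumbers : List (String × String)) (out : List Int × List Int × List Int) : Prop := out = defineSN_alt dict_serialNumbers
instance (dict_serialNumbers : List (String × String)) (out : List Int × List Int × List Int) : Decidable (Spec_defineSN dict_serialNumbers out) := by unfold Spec_defineSN; infer_instance

-- ===== CLAIM (what is proved, stated in full; the proofs are below) =====
def Claim_equal_defineSN : Prop := ∀ (dict_serialNumbers : List (String × String)), Dom_defineSN dict_serialNumbers → Spec_defineSN dict_serialNumbers (defineSN dict_serialNumbers)

-- ===== LEMMAS AND PROOFS =====

def pvCat (sub : String) (d : List (String × String)) : List Int :=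
  ((pvValid d).filter (fun kv => PySem.Str.isIn sub kv.1)).map (·.2)

theorem defineSN_loop (d : List (String × String)) (a b t : List Int) :
    d.foldl
      (fun (acc : List Int × List Int × List Int) kv =>
        match PySem.Int.ofStr? kv.2 with
        | none => acc
        | some v =>
          let anemometers := if PySem.Str.isIn "ANE" kv.1 then acc.1 ++ [v] else acc.1
          let barometers := if PySem.Str.isIn "BAR" kv.1 then acc.2.1 ++ [v] else acc.2.1
          let thermohygrometers := if PySem.Str.isIn "TH" kv.1 then acc.2.2 ++ [v] else acc.2.2
          (anemometers, barometers, thermohygrometers))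
      (a, b, t)
    = (a ++ pvCat "ANE" d, b ++ pvCat "BAR" d, t ++ pvCat "TH" d) := by
  induction d generalizing a b t with
  | nil => simp [pvCat, pvValid]
  | cons kv rest ih =>
    simp only [List.foldl_cons]
    cases h : PySem.Int.ofStr? kv.2 with
    | none =>
      simp only [h]
      rw [ih]
      simp [pvCat, pvValid, h]
    | some v =>
      simp only [h]
      rw [ih]
      simp only [pvCat, pvValid, List.filterMap_cons, h, Option.map_some, List.filter_cons]
      split_ifs <;> simp

-- ===== VERDICT (by name: the statement is the Claim_ definition above) =====
theorem defineSN_spec : Claim_equal_defineSN := by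
  intro d _
  show defineSN d = defineSN_alt d
  unfold defineSN defineSN_alt
  rw [defineSN_loop]
  simp [pvCat]
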